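-- pv_equiv track=rewrite | github.com/EugeniaFranchi/TP2-Algo1 | TP2-Código.py | siguiente_estado_celdas
-- ===== SOURCE A (Python) =====
-- def celdas_adyacentes(celda, tamaño_fractal):
--     """Recive una celda y el tamaño del fractal donde se encuentra y devuelve las coordenadas de las celdas adyacentes. """
--
--     tamaño_mapa_h, tamaño_mapa_v= tamaño_fractal
--     x,y=celda
--     adys=[]
--     for n in [-1,1]:
--         if tamaño_mapa_h>x+n>-1:
--             ady1=(x+n,y)
--             adys.append(ady1)
--         if tamaño_mapa_v>y+n>-1:
--             ady2=(x,y+n)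
--             adys.append(ady2)
--     return adys
--
-- def siguiente_estado_celdas(dic_coordenadas, tamaño_fractal):
--     """Recibe el diccionario de coordenadas de un fractal y devuelve el estado que sigue."""
--     tamaño_mapa_h, tamaño_mapa_v= tamaño_fractal
--     nuevo_estado={}
--     for celda in dic_coordenadas:
--         arena=dic_coordenadas[celda]
--         nueva_arena=nuevo_estado.get(celda,0)
--         nuevo_estado[celda]=nueva_arena+arena
--         if arena>=4:
--             adyacentes=celdas_adyacentes(celda, tamaño_fractal)
--             for ady in adyacentes:
--                 arena_ady=nuevo_estado.get(ady,0)
--                 nuevo_estado[ady]=arena_ady+arena//4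
--             nuevo_estado[celda]+=arena%4-arena
--             if nuevo_estado[celda]==0:
--                 nuevo_estado.pop(celda)
--     return nuevo_estado
-- ===== SOURCE B (Python) =====
-- def celdas_adyacentes(celda, tamaño_fractal):
--     """Recive una celda y el tamaño del fractal donde se encuentra y devuelve las coordenadas de las celdas adyacentes. """
--
--     tamaño_mapa_h, tamaño_mapa_v= tamaño_fractal
--     x,y=celda
--     adys=[]
--     for n in [-1,1]:
--         if tamaño_mapa_h>x+n>-1:
--             ady1=(x+n,y)
--             adys.append(ady1)
--         if tamaño_mapa_v>y+n>-1:
--             ady2=(x,y+n)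
--             adys.append(ady2)
--     return adys
--
-- def siguiente_estado_celdas(dic_coordenadas, tamaño_fractal):
--     """Recibe el diccionario de coordenadas de un fractal y devuelve el estado que sigue."""
--     # First compile the whole update schedule into a flat instruction list
--     # ("add sand" / "drop the cell if it ended at 0"), then execute it.
--     programa = []
--     for celda, arena in dic_coordenadas.items():
--         programa.append(("add", celda, arena))
--         if arena >= 4:
--             for ady in celdas_adyacentes(celda, tamaño_fractal):
--                 programa.append(("add", ady, arena // 4))
--             programa.append(("add", celda, arena % 4 - arena))
--             programa.append(("drop0", celda, 0))
--     estado = {}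
--     for op, k, d in programa:
--         if op == "add":
--             estado[k] = estado.get(k, 0) + d
--         elif estado.get(k) == 0:
--             estado.pop(k)
--     return estado
-- ===== Notes on version B (the rewrite author's own statement) =====
-- stated objective: alternative
-- what changed: B separates the update into two phases: it first compiles the whole toppling schedule into a flat instruction list (add-sand / drop-if-zero ops), then executes it with a small interpreter loop, instead of A's nested loops mutating the dict inline.
import Mathlib
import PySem

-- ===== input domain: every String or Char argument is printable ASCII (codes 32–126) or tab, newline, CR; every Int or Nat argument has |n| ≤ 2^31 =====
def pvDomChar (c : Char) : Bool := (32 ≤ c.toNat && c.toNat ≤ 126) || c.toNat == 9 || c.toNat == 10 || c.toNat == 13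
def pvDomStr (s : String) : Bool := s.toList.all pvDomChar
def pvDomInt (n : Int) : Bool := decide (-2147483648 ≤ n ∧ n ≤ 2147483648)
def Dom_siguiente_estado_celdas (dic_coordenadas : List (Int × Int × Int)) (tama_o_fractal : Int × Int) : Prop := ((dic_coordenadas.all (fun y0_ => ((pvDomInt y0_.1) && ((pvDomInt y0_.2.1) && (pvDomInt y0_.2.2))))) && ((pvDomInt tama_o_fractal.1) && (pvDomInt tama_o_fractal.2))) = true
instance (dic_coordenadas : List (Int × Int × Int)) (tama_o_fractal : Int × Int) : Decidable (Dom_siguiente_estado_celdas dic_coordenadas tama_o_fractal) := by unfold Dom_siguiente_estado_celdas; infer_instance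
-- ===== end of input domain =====

-- B restates the update as a flat instruction list (compile the schedule, then execute it);
-- same cost, different decomposition (objective: alternative).

-- ===== PORT A =====
-- helper function of the same module, used verbatim by both versions
def celdasAdyacentes (celda : Int × Int) (tama_o_fractal : Int × Int) : List (Int × Int) :=
  List.foldl (fun adys n =>
    let adys := if tama_o_fractal.1 > celda.1 + n ∧ celda.1 + n > -1 then adys ++ [(celda.1 + n, celda.2)] else adys
    if tama_o_fractal.2 > celda.2 + n ∧ celda.2 + n > -1 then adys ++ [(celda.1, celda.2 + n)] else adys)
    [] [-1, 1]

-- the body of A's 'for celda in dic_coordenadas' loop (d is the input dict, ns is nuevo_estado)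
def pvPasoA (d : PySem.Dict (Int × Int) Int) (tama_o_fractal : Int × Int)
    (ns : PySem.Dict (Int × Int) Int) (kv : (Int × Int) × Int) : PySem.Dict (Int × Int) Int :=
  let celda := kv.1
  let arena := d.getD celda 0   -- dic_coordenadas[celda]; the key comes from d itself, so the lookup always succeeds
  let ns := ns.insert celda (ns.getD celda 0 + arena)
  if arena ≥ 4 then
    let ns := (celdasAdyacentes celda tama_o_fractal).foldl
      (fun ns ady => ns.insert ady (ns.getD ady 0 + PySem.Int.floordiv arena 4)) ns
    let ns := ns.insert celda (ns.getD celda 0 + (PySem.Int.mod arena 4 - arena))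
    if ns.getD celda 0 = 0 then ns.erase celda else ns
  else ns

def siguiente_estado_celdas (dic_coordenadas : List (Int × Int × Int)) (tama_o_fractal : Int × Int) : List (Int × Int × Int) :=
  let d : PySem.Dict (Int × Int) Int := PySem.Dict.ofList (dic_coordenadas.map (fun e => ((e.1, e.2.1), e.2.2)))
  let final := d.items.foldl (pvPasoA d tama_o_fractal) PySem.Dict.empty
  final.items.map (fun e => (e.1.1, e.1.2, e.2))

-- ===== PORT B =====
inductive PvOp where
  | add : Int × Int → Int → PvOp
  | drop0 : Int × Int → PvOp
deriving DecidableEq, Repr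

-- the instruction block B emits for one cell
def pvBlock (tama_o_fractal : Int × Int) (kv : (Int × Int) × Int) : List PvOp :=
  [PvOp.add kv.1 kv.2] ++
  (if kv.2 ≥ 4 then
    (celdasAdyacentes kv.1 tama_o_fractal).map (fun ady => PvOp.add ady (PySem.Int.floordiv kv.2 4)) ++
    [PvOp.add kv.1 (PySem.Int.mod kv.2 4 - kv.2), PvOp.drop0 kv.1]
   else [])

-- one step of B's interpreter loop
def pvExec (estado : PySem.Dict (Int × Int) Int) (op : PvOp) : PySem.Dict (Int × Int) Int :=
  match op with
  | .add k del => estado.insert k (estado.getD k 0 + del)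
  | .drop0 k => if estado.get? k = some 0 then estado.erase k else estado

def siguiente_estado_celdas_alt (dic_coordenadas : List (Int × Int × Int)) (tama_o_fractal : Int × Int) : List (Int × Int × Int) :=
  let d : PySem.Dict (Int × Int) Int := PySem.Dict.ofList (dic_coordenadas.map (fun e => ((e.1, e.2.1), e.2.2)))
  let programa := d.items.flatMap (pvBlock tama_o_fractal)
  let estado := programa.foldl pvExec PySem.Dict.empty
  estado.items.map (fun e => (e.1.1, e.1.2, e.2))

-- ===== PRECONDITION & SPEC =====
def Spec_siguiente_estado_celdas (dic_coordenadas : List (Int × Int × Int)) (tama_o_fractal : Int × Int) (out : List (Int × Int × Int)) : Prop := out = siguiente_estado_celdas_alt dic_coordenadas tama_o_fractal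
instance (dic_coordenadas : List (Int × Int × Int)) (tama_o_fractal : Int × Int) (out : List (Int × Int × Int)) : Decidable (Spec_siguiente_estado_celdas dic_coordenadas tama_o_fractal out) := by unfold Spec_siguiente_estado_celdas; infer_instance

-- ===== CLAIM (what is proved, stated in full; the proofs are below) =====
def Claim_equal_siguiente_estado_celdas : Prop := ∀ (dic_coordenadas : List (Int × Int × Int)) (tama_o_fractal : Int × Int), Dom_siguiente_estado_celdas dic_coordenadas tama_o_fractal → Spec_siguiente_estado_celdas dic_coordenadas tama_o_fractal (siguiente_estado_celdas dic_coordenadas tama_o_fractal)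

-- ===== LEMMAS AND PROOFS =====

-- one loop iteration of A equals executing B's instruction block for that cell
lemma pvPasoA_eq_foldl_block (d : PySem.Dict (Int × Int) Int) (tama_o_fractal : Int × Int)
    (st : PySem.Dict (Int × Int) Int) (kv : (Int × Int) × Int) (h : d.getD kv.1 0 = kv.2) :
    pvPasoA d tama_o_fractal st kv = (pvBlock tama_o_fractal kv).foldl pvExec st := by
  unfold pvPasoA pvBlock
  dsimp only
  rw [h]
  by_cases h4 : kv.2 ≥ 4
  · simp only [h4, if_pos, List.foldl_cons, List.foldl_append, List.foldl_map, List.foldl_nil, pvExec]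
    simp [PySem.Dict.get?_insert_self, PySem.Dict.getD_insert_self]
  · simp [h4, pvExec]

-- the whole loop of A equals interpreting the concatenation of the blocks
lemma pvFoldl_eq_flatMap (d : PySem.Dict (Int × Int) Int) (tama_o_fractal : Int × Int)
    (l : List ((Int × Int) × Int)) (st : PySem.Dict (Int × Int) Int)
    (h : ∀ kv ∈ l, d.getD kv.1 0 = kv.2) :
    l.foldl (pvPasoA d tama_o_fractal) st = (l.flatMap (pvBlock tama_o_fractal)).foldl pvExec st := by
  induction l generalizing st with
  | nil => rfl
  | cons a t ih =>
    simp only [List.foldl_cons, List.flatMap_cons, List.foldl_append]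
    rw [pvPasoA_eq_foldl_block d tama_o_fractal st a (h a (by simp))]
    exact ih _ (fun kv hkv => h kv (by simp [hkv]))

-- ===== VERDICT (by name: the statement is the Claim_ definition above) =====
theorem siguiente_estado_celdas_spec : Claim_equal_siguiente_estado_celdas := by
  intro dic tam _
  unfold Spec_siguiente_estado_celdas siguiente_estado_celdas siguiente_estado_celdas_alt
  dsimp only
  have h : ∀ kv ∈ (PySem.Dict.ofList (dic.map (fun e => ((e.1, e.2.1), e.2.2)))).items,
      (PySem.Dict.ofList (dic.map (fun e => ((e.1, e.2.1), e.2.2)))).getD kv.1 0 = kv.2 := by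
    rintro ⟨k, v⟩ hm
    exact PySem.Dict.getD_of_mem_items _ hm (PySem.Dict.nodup_keys_ofList _) 0
  rw [pvFoldl_eq_flatMap _ tam _ _ h]
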